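-- pv_equiv track=rewrite | github.com/Yldrax/everybody-codes | 2025/quest_09.py | find_calc_similarities
-- ===== SOURCE A (Python) =====
-- from itertools import combinations
--
-- def calc_similarity(notes: list[str] | tuple[str, str, str]) -> int:
--     parent1 = 0
--     parent2 = 0
--     for p1, p2, c in zip(*notes):
--         if p1 == c:
--             parent1 += 1
--         if p2 == c:
--             parent2 += 1
--         if c not in (p1, p2):
--             return -1
--     return parent1 * parent2
--
-- def find_calc_similarities(notes: list[str]) -> int:
--     total = 0
--
--     parents = list(combinations(notes, 2))
--     for child in notes:
--         for parent_pair in parents: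
--             if child not in parent_pair:
--                 similarity = calc_similarity((*parent_pair, child))
--                 if similarity != -1:
--                     total += similarity
--     return total
-- ===== SOURCE B (Python) =====
-- def _sim0(a: str, b: str, c: str) -> int:
--     trip = list(zip(a, b, c))
--     if any(z != x and z != y for x, y, z in trip):
--         return 0
--     return sum(x == z for x, _, z in trip) * sum(y == z for _, y, z in trip)
--
--
-- def find_calc_similarities(notes: list[str]) -> int:
--     # Deduplicate: aggregate over distinct strings with multiplicities,
--     # counting index pairs combinatorially instead of enumerating them.
--     cnt: dict[str, int] = {}
--     for s in notes:
--         cnt[s] = cnt.get(s, 0) + 1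
--     items = list(cnt.items())
--     total = 0
--     for c, mc in items:
--         sub = 0
--         for i, (a, ma) in enumerate(items):
--             if a == c:
--                 continue
--             for b, mb in items[i:]:
--                 if b == c:
--                     continue
--                 weight = ma * (ma - 1) // 2 if b == a else ma * mb
--                 sub += weight * _sim0(a, b, c)
--         total += mc * sub
--     return total
-- ===== Notes on version B (the rewrite author's own statement) =====
-- stated objective: alternative
-- what changed: B deduplicates the notes into a string-to-multiplicity table and sums each distinct (parent-class, parent-class, child-class) triple once with combinatorial weights (m_a*m_b across classes, C(m_a,2) within a class, times the child multiplicity), instead of A's enumeration of every occurrence triple via combinations(notes, 2).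
import Mathlib
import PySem

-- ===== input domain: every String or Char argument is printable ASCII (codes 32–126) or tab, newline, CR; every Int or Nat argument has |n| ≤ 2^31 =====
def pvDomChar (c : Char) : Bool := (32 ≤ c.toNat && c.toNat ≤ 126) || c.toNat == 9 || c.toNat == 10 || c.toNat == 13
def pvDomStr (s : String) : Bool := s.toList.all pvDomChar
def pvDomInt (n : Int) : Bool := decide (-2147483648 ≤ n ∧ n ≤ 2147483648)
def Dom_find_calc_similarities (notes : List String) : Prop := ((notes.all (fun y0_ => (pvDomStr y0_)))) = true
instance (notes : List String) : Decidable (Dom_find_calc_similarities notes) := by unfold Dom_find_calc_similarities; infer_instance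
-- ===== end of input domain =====

-- B deduplicates the notes into a string→multiplicity table and sums each distinct triple
-- once with combinatorial weights (m_a*m_b, C(m_a,2)), instead of A's enumeration of every
-- occurrence triple (objective: alternative).

-- ===== PORT A =====
-- zip(*notes) for three strings: truncate to the shortest
def pvZip3 : List Char → List Char → List Char → List (Char × Char × Char)
  | x :: xs, y :: ys, z :: zs => (x, y, z) :: pvZip3 xs ys zs
  | _, _, _ => []

-- the 'for p1, p2, c in zip(*notes)' loop of calc_similarity, with its early return -1
def pvCalcAux : List (Char × Char × Char) → Int → Int → Int
  | [], p1, p2 => p1 * p2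
  | (a, b, c) :: rest, p1, p2 =>
      let p1' := if a == c then p1 + 1 else p1
      let p2' := if b == c then p2 + 1 else p2
      if ¬ (c = a ∨ c = b) then -1 else pvCalcAux rest p1' p2'

def calc_similarity (p1 p2 c : String) : Int :=
  pvCalcAux (pvZip3 p1.toList p2.toList c.toList) 0 0

-- list(combinations(notes, 2))
def pvCombs : List String → List (String × String)
  | [] => []
  | x :: xs => xs.map (fun y => (x, y)) ++ pvCombs xs

def find_calc_similarities (notes : List String) : Int :=
  notes.foldl
    (fun total child =>
      (pvCombs notes).foldl
        (fun t p =>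
          if ¬ (child = p.1 ∨ child = p.2) then
            let similarity := calc_similarity p.1 p.2 child
            if similarity ≠ -1 then t + similarity else t
          else t)
        total)
    0

-- ===== PORT B =====
-- _sim0: similarity of the triple, 0 when some child position is covered by neither parent
def pvSim0 (a b c : String) : Int :=
  let trip := pvZip3 a.toList b.toList c.toList
  if trip.any (fun t => !(t.2.2 == t.1) && !(t.2.2 == t.2.1)) then 0
  else (trip.countP (fun t => t.1 == t.2.2) : Int) * (trip.countP (fun t => t.2.1 == t.2.2) : Int)

-- the nested 'enumerate(items)' / 'items[i:]' loops of B
def pvPairLoop (c : String) : List (String × Int) → Int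
  | [] => 0
  | (a, ma) :: rest =>
      (if a == c then 0
       else ((a, ma) :: rest).foldl
         (fun t p =>
           if p.1 == c then t
           else t + (if p.1 == a then PySem.Int.floordiv (ma * (ma - 1)) 2 else ma * p.2) * pvSim0 a p.1 c)
         0)
      + pvPairLoop c rest

def find_calc_similarities_alt (notes : List String) : Int :=
  let cnt := notes.foldl (fun d s => d.insert s (d.getD s 0 + 1)) PySem.Dict.empty
  let items := cnt.items
  items.foldl (fun total p => total + p.2 * pvPairLoop p.1 items) 0

-- ===== PRECONDITION & SPEC =====
def Spec_find_calc_similarities (notes : List String) (out : Int) : Prop := out = find_calc_similarities_alt notes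
instance (notes : List String) (out : Int) : Decidable (Spec_find_calc_similarities notes out) := by unfold Spec_find_calc_similarities; infer_instance

-- ===== CLAIM (what is proved, stated in full; the proofs are below) =====
def Claim_equal_find_calc_similarities : Prop := ∀ (notes : List String), Dom_find_calc_similarities notes → Spec_find_calc_similarities notes (find_calc_similarities notes)

-- ===== LEMMAS AND PROOFS =====

-- the per-pair value both programs sum: 0 when the child string is one of the parents or
-- some position is uncovered, else the match-count product
def pvg (c a b : String) : Int := if c = a ∨ c = b then 0 else pvSim0 a b c

-- swapping the two parents transposes the zip3
theorem pvZip3_swap (a b c : List Char) :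
    pvZip3 b a c = (pvZip3 a b c).map (fun t => (t.2.1, t.1, t.2.2)) := by
  induction a generalizing b c with
  | nil => cases b <;> cases c <;> simp [pvZip3]
  | cons x xs ih => cases b <;> cases c <;> simp [pvZip3, ih]

theorem pvSim0_symm (a b c : String) : pvSim0 a b c = pvSim0 b a c := by
  simp only [pvSim0, pvZip3_swap a.toList b.toList c.toList, List.any_map, List.countP_map]
  have h1 : ((fun t : Char × Char × Char => !(t.2.2 == t.1) && !(t.2.2 == t.2.1)) ∘
      (fun t : Char × Char × Char => (t.2.1, t.1, t.2.2)))
      = (fun t : Char × Char × Char => !(t.2.2 == t.1) && !(t.2.2 == t.2.1)) := by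
    funext t; simp [Function.comp, Bool.and_comm]
  rw [h1]
  split
  · rfl
  · rw [mul_comm]; rfl

theorem pvg_symm (c a b : String) : pvg c a b = pvg c b a := by
  simp only [pvg, or_comm, pvSim0_symm a b c]

-- closed form of A's early-return loop
theorem pvCalcAux_eq (l : List (Char × Char × Char)) (p1 p2 : Int) :
    pvCalcAux l p1 p2 =
      if l.all (fun t => t.1 == t.2.2 || t.2.1 == t.2.2) then
        (p1 + (l.countP (fun t => t.1 == t.2.2) : Int)) *
          (p2 + (l.countP (fun t => t.2.1 == t.2.2) : Int))
      else -1 := by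
  induction l generalizing p1 p2 with
  | nil => simp [pvCalcAux]
  | cons hd t ih =>
    obtain ⟨a, b, c⟩ := hd
    by_cases hcov : c = a ∨ c = b
    · have hhd : (a == c || b == c) = true := by
        rcases hcov with h | h <;> simp [h]
      rw [show pvCalcAux ((a, b, c) :: t) p1 p2
            = pvCalcAux t (if a == c then p1 + 1 else p1) (if b == c then p2 + 1 else p2)
          from by rw [pvCalcAux]; rw [if_neg (not_not_intro hcov)]]
      rw [ih]
      simp only [List.all_cons, List.countP_cons, hhd, Bool.true_and]
      split
      · have key : ∀ (q : Bool) (x : Int) (n : Nat),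
            (if q then x + 1 else x) + (n : Int)
              = x + (((n + if q then 1 else 0 : Nat)) : Int) := by
          intro q x n
          cases q <;> simp <;> omega
        rw [key, key]
      · rfl
    · have hhd : (a == c || b == c) = false := by
        have h1 : a ≠ c := fun h => hcov (Or.inl h.symm)
        have h2 : b ≠ c := fun h => hcov (Or.inr h.symm)
        simp [h1, h2]
      rw [show pvCalcAux ((a, b, c) :: t) p1 p2 = -1
          from by rw [pvCalcAux]; rw [if_pos hcov]]
      simp [List.all_cons, hhd]

-- A's guarded similarity is exactly pvg
theorem pvG_eq_pvg (c a b : String) :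
    (if ¬ (c = a ∨ c = b) then
      (if calc_similarity a b c ≠ -1 then calc_similarity a b c else 0)
     else 0) = pvg c a b := by
  simp only [pvg]
  by_cases h : c = a ∨ c = b
  · simp [h]
  · rw [if_pos h, if_neg h]
    simp only [calc_similarity, pvCalcAux_eq, zero_add, pvSim0]
    have hany : (pvZip3 a.toList b.toList c.toList).any
        (fun t => !(t.2.2 == t.1) && !(t.2.2 == t.2.1))
        = !(pvZip3 a.toList b.toList c.toList).all (fun t => t.1 == t.2.2 || t.2.1 == t.2.2) := by
      rw [List.any_eq_not_all_not]
      have hpred : (fun t : Char × Char × Char => !(!(t.2.2 == t.1) && !(t.2.2 == t.2.1)))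
          = (fun t : Char × Char × Char => t.1 == t.2.2 || t.2.1 == t.2.2) := by
        funext t
        cases ht1 : (t.1 == t.2.2) <;> cases ht2 : (t.2.1 == t.2.2) <;> simp_all [BEq.comm]
      rw [hpred]
    rw [hany]
    by_cases hall : (pvZip3 a.toList b.toList c.toList).all
        (fun t => t.1 == t.2.2 || t.2.1 == t.2.2) = true
    · rw [if_pos hall, hall]
      simp only [Bool.not_true, Bool.false_eq_true, if_false]
      rw [if_pos]
      have h1 := Int.natCast_nonneg ((pvZip3 a.toList b.toList c.toList).countP (fun t => t.1 == t.2.2))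
      have h2 := Int.natCast_nonneg ((pvZip3 a.toList b.toList c.toList).countP (fun t => t.2.1 == t.2.2))
      intro hcontra
      nlinarith
    · rw [if_neg hall]
      simp at hall
      simp [hall]

-- A's inner fold as a sum over the combinations list
theorem foldlA_eq (child : String) (l : List (String × String)) (t : Int) :
    l.foldl
        (fun t p =>
          if ¬ (child = p.1 ∨ child = p.2) then
            let similarity := calc_similarity p.1 p.2 child
            if similarity ≠ -1 then t + similarity else t
          else t)
        t = t + (l.map (fun p => pvg child p.1 p.2)).sum := by
  have hstep : (fun (t : Int) (p : String × String) =>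
      if ¬ (child = p.1 ∨ child = p.2) then
        let similarity := calc_similarity p.1 p.2 child
        if similarity ≠ -1 then t + similarity else t
      else t) = (fun t p => t + pvg child p.1 p.2) := by
    funext t p
    rw [← pvG_eq_pvg child p.1 p.2]
    by_cases h : child = p.1 ∨ child = p.2
    · simp [h]
    · simp only [h, not_false_iff, if_true]
      split <;> simp
  rw [hstep, PySem.List.foldl_add]

-- doubling identity for the unordered-combinations sum of a symmetric function
theorem two_mul_combs (f : String → String → Int) (hs : ∀ a b, f a b = f b a) (l : List String) :
    2 * ((pvCombs l).map (fun p => f p.1 p.2)).sum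
      = (l.map (fun a => (l.map (f a)).sum)).sum - (l.map (fun a => f a a)).sum := by
  induction l with
  | nil => simp [pvCombs]
  | cons x xs ih =>
    simp only [pvCombs, List.map_append, List.sum_append, List.map_map, List.map_cons,
      List.sum_cons]
    rw [PySem.List.sum_map_add_int]
    have hcol : (xs.map (fun a => f a x)).sum = (xs.map (f x)).sum := by
      congr 1
      apply List.map_congr_left
      intro a _
      exact hs a x
    rw [hcol]
    have hcomp : ((fun p : String × String => f p.1 p.2) ∘ fun y => (x, y)) = f x := by
      funext y; rfl
    rw [hcomp]
    linarith [ih]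

-- exact halving of the within-class pair count
theorem two_mul_floordiv (m : Int) : 2 * PySem.Int.floordiv (m * (m - 1)) 2 = m * (m - 1) := by
  obtain ⟨k, hk⟩ : Even (m * (m - 1)) := by
    have := Int.even_mul_succ_self (m - 1)
    simpa [mul_comm] using this
  rw [PySem.Int.floordiv_eq_ediv_of_pos (by norm_num), hk]
  omega

-- one step of B's pair loop, rows with distinct first components
theorem pvPairLoop_cons (c a : String) (ma : Int) (rest : List (String × Int))
    (hnot : a ∉ rest.map Prod.fst) :
    pvPairLoop c ((a, ma) :: rest)
      = PySem.Int.floordiv (ma * (ma - 1)) 2 * pvg c a a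
        + (rest.map (fun q => ma * (q.2 * pvg c a q.1))).sum
        + pvPairLoop c rest := by
  rw [pvPairLoop]
  congr 1
  by_cases hac : a = c
  · have h1 : (a == c) = true := by simp [hac]
    rw [if_pos h1]
    have hz : pvg c a a = 0 := by simp [pvg, hac]
    have hz2 : (rest.map (fun q => ma * (q.2 * pvg c a q.1))).sum = 0 := by
      apply List.sum_eq_zero
      intro y hy
      rcases List.mem_map.mp hy with ⟨q, _, rfl⟩
      simp [pvg, hac]
    rw [hz, hz2]; ring
  · have h1 : (a == c) = false := by simp [hac]
    rw [if_neg (by simp [h1])]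
    have hstep : (fun (t : Int) (p : String × Int) =>
        if p.1 == c then t
        else t + (if p.1 == a then PySem.Int.floordiv (ma * (ma - 1)) 2 else ma * p.2) * pvSim0 a p.1 c)
        = (fun t p => t + (if p.1 == c then 0
            else (if p.1 == a then PySem.Int.floordiv (ma * (ma - 1)) 2 else ma * p.2) * pvSim0 a p.1 c)) := by
      funext t p
      split <;> simp
    rw [hstep, PySem.List.foldl_add, List.map_cons, List.sum_cons]
    have hhead : (if a == c then (0 : Int)
        else (if a == a then PySem.Int.floordiv (ma * (ma - 1)) 2 else ma * ma) * pvSim0 a a c)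
        = PySem.Int.floordiv (ma * (ma - 1)) 2 * pvg c a a := by
      rw [if_neg (by simp [h1]), if_pos (by simp)]
      have hca : ¬ c = a := fun h => hac h.symm
      simp [pvg, hca]
    have htail : (rest.map (fun p => if p.1 == c then (0 : Int)
        else (if p.1 == a then PySem.Int.floordiv (ma * (ma - 1)) 2 else ma * p.2) * pvSim0 a p.1 c))
        = rest.map (fun q => ma * (q.2 * pvg c a q.1)) := by
      apply List.map_congr_left
      intro q hq
      have hqa : (q.1 == a) = false := by
        simp only [beq_eq_false_iff_ne, ne_eq]
        intro h
        exact hnot (List.mem_map.mpr ⟨q, hq, h⟩)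
      by_cases hqc : q.1 = c
      · simp [hqc, pvg]
      · rw [if_neg (by simp [hqc]), hqa]
        simp only [Bool.false_eq_true, if_false]
        have hca : ¬ c = a := fun h => hac h.symm
        have hcq : ¬ c = q.1 := fun h => hqc h.symm
        rw [show pvg c a q.1 = pvSim0 a q.1 c from by simp [pvg, hca, hcq]]
        ring
    rw [hhead, htail]
    ring

-- doubling identity for B's pair loop over rows with distinct keys
theorem two_mul_pvPairLoop (c : String) (items : List (String × Int))
    (hnd : (items.map Prod.fst).Nodup) :
    2 * pvPairLoop c items
      = (items.map (fun p => p.2 * ((items.map (fun q => q.2 * pvg c p.1 q.1)).sum))).sum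
        - (items.map (fun p => p.2 * pvg c p.1 p.1)).sum := by
  induction items with
  | nil => simp [pvPairLoop]
  | cons hd rest ih =>
    obtain ⟨a, ma⟩ := hd
    simp only [List.map_cons, List.nodup_cons] at hnd
    obtain ⟨hnot, hndr⟩ := hnd
    rw [pvPairLoop_cons c a ma rest hnot]
    simp only [List.map_cons, List.sum_cons]
    have hsplit : (rest.map (fun p : String × Int =>
          p.2 * (ma * pvg c p.1 a + (rest.map (fun q => q.2 * pvg c p.1 q.1)).sum)))
        = rest.map (fun p : String × Int =>
          ma * (p.2 * pvg c a p.1) + p.2 * ((rest.map (fun q => q.2 * pvg c p.1 q.1)).sum)) := by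
      apply List.map_congr_left
      intro p _
      rw [pvg_symm c p.1 a]
      ring
    rw [hsplit, PySem.List.sum_map_add_int,
      List.sum_map_mul_left rest (fun p : String × Int => p.2 * pvg c a p.1) ma]
    have h2 := two_mul_floordiv ma
    linear_combination pvg c a a * h2 + ih hndr

-- sum over the list = multiplicity-weighted sum over the counter's items
theorem counter_sum (l : List String) (T : String → Int) :
    (((PySem.Dict.counter l).items).map (fun p => p.2 * T p.1)).sum = (l.map T).sum := by
  rw [PySem.Dict.items_counter, List.map_map]
  have h1 : ((fun p : String × Int => p.2 * T p.1) ∘ fun k => (k, (l.count k : Int)))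
      = fun k => (l.count k : Int) * T k := by
    funext k; rfl
  rw [h1]
  have hnd := PySem.Set.nodup_ofList l
  have htf : (PySem.Set.ofList l).toFinset = l.toFinset := by
    ext x
    simp [PySem.Set.mem_ofList]
  rw [← List.sum_toFinset _ hnd, htf]
  rw [Finset.sum_list_map_count l T]
  apply Finset.sum_congr rfl
  intro m _
  rw [nsmul_eq_mul]

-- the common normal form of both programs' totals
theorem pairLoop_eq_combs_sum (l : List String) (c : String) :
    pvPairLoop c (PySem.Dict.counter l).items = ((pvCombs l).map (fun p => pvg c p.1 p.2)).sum := by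
  have hnd : ((PySem.Dict.counter l).items.map Prod.fst).Nodup := by
    have := PySem.Dict.nodup_keys_counter (κ := String) l
    simpa [PySem.Dict.keys] using this
  have h2 := two_mul_pvPairLoop c (PySem.Dict.counter l).items hnd
  have hinner : ∀ a : String,
      ((PySem.Dict.counter l).items.map (fun q => q.2 * pvg c a q.1)).sum = (l.map (pvg c a)).sum :=
    fun a => counter_sum l (pvg c a)
  have hD : ((PySem.Dict.counter l).items.map
        (fun p => p.2 * (((PySem.Dict.counter l).items.map (fun q => q.2 * pvg c p.1 q.1)).sum))).sum
      = (l.map (fun a => (l.map (pvg c a)).sum)).sum := by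
    have hpt : ((PySem.Dict.counter l).items.map
        (fun p => p.2 * (((PySem.Dict.counter l).items.map (fun q => q.2 * pvg c p.1 q.1)).sum)))
        = ((PySem.Dict.counter l).items.map (fun p => p.2 * ((l.map (pvg c p.1)).sum))) := by
      apply List.map_congr_left
      intro p _
      rw [hinner p.1]
    rw [hpt]
    exact counter_sum l (fun a => (l.map (pvg c a)).sum)
  have hdiag : ((PySem.Dict.counter l).items.map (fun p => p.2 * pvg c p.1 p.1)).sum
      = (l.map (fun a => pvg c a a)).sum := counter_sum l (fun a => pvg c a a)
  have h3 := two_mul_combs (pvg c) (pvg_symm c) l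
  rw [hD, hdiag] at h2
  omega

-- ===== VERDICT (by name: the statement is the Claim_ definition above) =====
theorem find_calc_similarities_spec : Claim_equal_find_calc_similarities := by
  intro notes _
  show find_calc_similarities notes = find_calc_similarities_alt notes
  unfold find_calc_similarities find_calc_similarities_alt
  simp only [PySem.Dict.foldl_insert_getD_add_one_eq_counter]
  have hA : (fun (total : Int) (child : String) =>
      (pvCombs notes).foldl
        (fun t p =>
          if ¬ (child = p.1 ∨ child = p.2) then
            let similarity := calc_similarity p.1 p.2 child
            if similarity ≠ -1 then t + similarity else t
          else t)
        total)
      = (fun total child => total + ((pvCombs notes).map (fun p => pvg child p.1 p.2)).sum) := by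
    funext total child
    exact foldlA_eq child (pvCombs notes) total
  rw [hA, PySem.List.foldl_add, PySem.List.foldl_add, zero_add, zero_add]
  have hB : ((PySem.Dict.counter notes).items.map
      (fun p => p.2 * pvPairLoop p.1 (PySem.Dict.counter notes).items))
      = ((PySem.Dict.counter notes).items.map
      (fun p => p.2 * ((pvCombs notes).map (fun q => pvg p.1 q.1 q.2)).sum)) := by
    apply List.map_congr_left
    intro p _
    rw [pairLoop_eq_combs_sum notes p.1]
  rw [hB, counter_sum notes (fun c => ((pvCombs notes).map (fun q => pvg c q.1 q.2)).sum)]
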